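-- pv_equiv track=rewrite | github.com/sunilsoni/interview-notes-python | com/interview/2024/sep/LargestLexicographicalString1.py | solution
-- ===== SOURCE A (Python) =====
-- def solution(N: int) -> str:
--     counts = [0] * 26  # counts for letters 'a' to 'z'
--     counts[0] = N  # Start with N 'a's
--
--     # Perform transformations from 'a' to 'y'
--     for i in range(25):
--         counts[i + 1] += counts[i] // 2  # Transform pairs to the next letter
--         counts[i] %= 2  # Keep the remainder
--
--     # Handle 'z's (we can only have up to 25 'z's)
--     counts[25] %= 26
--
--     # Build the result string from 'z' to 'a'
--     result = []
--     for i in range(25, -1, -1):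
--         result.extend([chr(ord('a') + i)] * counts[i])
--
--     return ''.join(result)
-- ===== SOURCE B (Python) =====
-- def solution(N: int) -> str:
--     # Single recursive pass: halve n while appending each letter's run directly;
--     # no counts array, no carry sweep, no separate reverse emission loop.
--     def go(n: int, i: int) -> str:
--         if i == 25:
--             return 'z' * (n % 26)
--         return go(n // 2, i + 1) + chr(ord('a') + i) * (n % 2)
--     return go(N, 0)
-- ===== Notes on version B (the rewrite author's own statement) =====
-- stated objective: simpler
-- what changed: B replaces A's per-letter counts array, carry-propagation sweep and separate reverse emission loop with one recursive pass that halves n and appends each letter's run directly while unwinding, capping the top letter's run at the alphabet bound.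
import Mathlib
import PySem

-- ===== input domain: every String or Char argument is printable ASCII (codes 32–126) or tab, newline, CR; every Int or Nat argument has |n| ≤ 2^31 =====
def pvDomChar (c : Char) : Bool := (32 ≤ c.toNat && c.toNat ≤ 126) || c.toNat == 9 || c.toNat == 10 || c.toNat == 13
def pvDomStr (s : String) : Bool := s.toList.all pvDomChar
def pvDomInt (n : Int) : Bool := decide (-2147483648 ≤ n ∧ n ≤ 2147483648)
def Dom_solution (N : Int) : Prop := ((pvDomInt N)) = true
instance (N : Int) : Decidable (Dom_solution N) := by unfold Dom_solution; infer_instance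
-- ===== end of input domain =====

-- B replaces A's counts array, carry sweep and separate reverse emission loop with one
-- recursive pass that halves n and appends each letter's run directly (simpler).

-- ===== PORT A =====
-- one body of A's carry loop: counts[i+1] += counts[i] // 2; counts[i] %= 2
def solStepA (cs : List Int) (i : Nat) : List Int :=
  ((cs.set (i+1) (cs.getD (i+1) 0 + PySem.Int.floordiv (cs.getD i 0) 2)).set i
    (PySem.Int.mod ((cs.set (i+1) (cs.getD (i+1) 0 + PySem.Int.floordiv (cs.getD i 0) 2)).getD i 0) 2))

def solution (N : Int) : String :=
  let counts : List Int := List.replicate 26 0     -- [0] * 26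
  let counts := counts.set 0 N                     -- counts[0] = N
  let counts := (List.range 25).foldl solStepA counts   -- for i in range(25): ...
  let counts := counts.set 25 (PySem.Int.mod (counts.getD 25 0) 26)  -- counts[25] %= 26
  -- for i in range(25, -1, -1): result.extend([chr(ord('a')+i)] * counts[i])
  -- range(25,-1,-1) enumerates 25,24,…,0 = (List.range 26).reverse (exact)
  let result := (List.range 26).reverse.foldl
    (fun r i => r ++ List.replicate (counts.getD i 0).toNat (Char.ofNat ('a'.toNat + i)))
    ([] : List Char)
  String.ofList result                             -- ''.join(result)

-- ===== PORT B =====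
-- Source B's go(n, i), transcribed with the countdown k = 25 - i as the structural
-- recursion measure (so i = 25 ↔ k = 0, and chr(ord('a')+i) = Char.ofNat ('a'+(24-k))
-- in the recursive case, where i = 25-(k+1) = 24-k); '//' and '%' are Python's.
def solGoB : Int → Nat → List Char
  | n, 0     => List.replicate (PySem.Int.mod n 26).toNat 'z'
  | n, k+1   => solGoB (PySem.Int.floordiv n 2) k ++
                List.replicate (PySem.Int.mod n 2).toNat (Char.ofNat ('a'.toNat + (24 - k)))

def solution_alt (N : Int) : String := String.ofList (solGoB N 25)   -- go(N, 0)

-- ===== PRECONDITION & SPEC =====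
def Spec_solution (N : Int) (out : String) : Prop := out = solution_alt N
instance (N : Int) (out : String) : Decidable (Spec_solution N out) := by unfold Spec_solution; infer_instance

-- ===== CLAIM (what is proved, stated in full; the proofs are below) =====
def Claim_equal_solution : Prop := ∀ (N : Int), Dom_solution N → Spec_solution N (solution N)

-- ===== LEMMAS AND PROOFS =====

-- the count A's final counts list holds at index i, in closed form
def solCnt (N : Int) (i : Nat) : Int :=
  if i = 25 then PySem.Int.mod (PySem.Int.floordiv N (2^25)) 26
  else PySem.Int.mod (PySem.Int.floordiv N (2^i)) 2

-- the run of letters emitted for index i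
def solPiece (N : Int) (i : Nat) : List Char :=
  List.replicate (solCnt N i).toNat (Char.ofNat ('a'.toNat + i))

-- the counts list after k iterations of A's carry loop
def solStateA (N : Int) (k : Nat) : List Int :=
  (List.range 26).map (fun j =>
    if j < k then PySem.Int.mod (PySem.Int.floordiv N (2^j)) 2
    else if j = k then PySem.Int.floordiv N (2^k) else 0)

lemma fdiv_fdiv_two (a : Int) (k : Nat) :
    PySem.Int.floordiv (PySem.Int.floordiv a (2^k)) 2 = PySem.Int.floordiv a (2^(k+1)) := by
  have hk : (0:Int) < 2^k := by positivity
  have hq := (PySem.Int.floordiv_eq_iff_of_pos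
      (a := a) (b := 2^(k+1)) (q := PySem.Int.floordiv a (2^(k+1))) (by positivity)).mp rfl
  rw [pow_succ] at hq
  rw [PySem.Int.floordiv_eq_iff_of_pos (by norm_num : (0:Int) < 2),
      PySem.Int.le_floordiv_iff_mul_le hk, PySem.Int.floordiv_lt_iff_lt_mul hk, pow_succ]
  constructor
  · nlinarith [hq.1]
  · nlinarith [hq.2]

lemma solStateA_getElem (N : Int) (k j : Nat) (h : j < (solStateA N k).length) :
    (solStateA N k)[j] =
      (if j < k then PySem.Int.mod (PySem.Int.floordiv N (2^j)) 2
       else if j = k then PySem.Int.floordiv N (2^k) else 0) := by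
  simp [solStateA]

lemma solStateA_getD (N : Int) (k j : Nat) (hj : j < 26) :
    (solStateA N k).getD j 0 =
      (if j < k then PySem.Int.mod (PySem.Int.floordiv N (2^j)) 2
       else if j = k then PySem.Int.floordiv N (2^k) else 0) := by
  have h : j < (solStateA N k).length := by simp [solStateA]; omega
  rw [List.getD_eq_getElem?_getD, List.getElem?_eq_getElem h]
  simp [solStateA_getElem]

lemma solLoopA (N : Int) (k : Nat) (hk : k ≤ 25) :
    (List.range k).foldl solStepA ((List.replicate 26 (0:Int)).set 0 N) = solStateA N k := by
  induction k with
  | zero =>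
    simp only [List.range_zero, List.foldl_nil]
    apply List.ext_getElem
    · simp [solStateA]
    · intro j h1 h2
      have hj : j < 26 := by simpa using h1
      rw [List.getElem_set, solStateA_getElem]
      by_cases h : j = 0
      · subst h; simp [PySem.Int.floordiv]
      · rw [if_neg (fun hh => h hh.symm), List.getElem_replicate]
        simp [h]
  | succ k ih =>
    have hk' : k ≤ 25 := by omega
    rw [List.range_succ, List.foldl_append, List.foldl_cons, List.foldl_nil, ih hk']
    have hg1 : (solStateA N k).getD (k+1) 0 = 0 := by
      rw [solStateA_getD N k (k+1) (by omega)]; simp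
    have hgk : (solStateA N k).getD k 0 = PySem.Int.floordiv N (2^k) := by
      rw [solStateA_getD N k k (by omega)]; simp
    have hlen : (solStateA N k).length = 26 := by simp [solStateA]
    have hgk' : ((solStateA N k).set (k+1)
        ((solStateA N k).getD (k+1) 0 + PySem.Int.floordiv ((solStateA N k).getD k 0) 2)).getD k 0
        = PySem.Int.floordiv N (2^k) := by
      rw [List.getD_eq_getElem?_getD, List.getElem?_set_ne (by omega), ← List.getD_eq_getElem?_getD, hgk]
    unfold solStepA
    rw [hgk', hg1, hgk, zero_add, fdiv_fdiv_two]
    apply List.ext_getElem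
    · simp [solStateA]
    · intro j h1 h2
      have hj : j < 26 := by simpa [solStateA] using h2
      rw [List.getElem_set, List.getElem_set, solStateA_getElem N k j,
        solStateA_getElem N (k+1) j h2]
      by_cases hjk : k = j
      · subst hjk; simp
      · rw [if_neg hjk]
        by_cases hjk1 : k+1 = j
        · subst hjk1
          rw [if_pos rfl]
          simp
        · rw [if_neg hjk1]
          by_cases hlt : j < k
          · simp [hlt, (by omega : j < k+1)]
          · rw [if_neg hlt, if_neg (by omega : ¬ j = k), if_neg (by omega : ¬ j < k+1),
              if_neg (by omega : ¬ j = k+1)]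

-- the final counts value at each index equals the closed form solCnt
lemma counts_eq_cnt (N : Int) (j : Nat) (hj : j < 26) :
    (((List.range 25).foldl solStepA ((List.replicate 26 (0:Int)).set 0 N)).set 25
        (PySem.Int.mod (((List.range 25).foldl solStepA ((List.replicate 26 (0:Int)).set 0 N)).getD 25 0) 26)).getD j 0
      = solCnt N j := by
  rw [solLoopA N 25 (le_refl 25)]
  have hlen : (solStateA N 25).length = 26 := by simp [solStateA]
  by_cases h : j = 25
  · subst h
    rw [List.getD_eq_getElem?_getD, List.getElem?_set_self (by omega)]
    rw [solStateA_getD N 25 25 (by omega)]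
    simp [solCnt]
  · rw [List.getD_eq_getElem?_getD, List.getElem?_set_ne (fun hh => h hh.symm),
      ← List.getD_eq_getElem?_getD, solStateA_getD N 25 j hj]
    have hlt : j < 25 := by omega
    simp [hlt, solCnt, h]

-- A's result: pieces for i = 25 down to 0
lemma solutionA_eq_pieces (N : Int) :
    solution N = String.ofList ((List.range 26).reverse.flatMap (solPiece N)) := by
  simp only [solution, PySem.List.foldl_append_eq_flatMap, List.nil_append]
  rw [List.flatMap_def, List.flatMap_def]
  refine congrArg String.ofList (congrArg List.flatten ?_)
  apply List.map_congr_left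
  intro i hi
  have hi26 : i < 26 := by
    have := List.mem_reverse.mp hi
    simpa using this
  rw [counts_eq_cnt N i hi26, solPiece]

-- B's recursion, characterized: started at n = N >> (25-k), level k emits
-- exactly the pieces for i = 25 down to 25-k
lemma solGoB_spec (N : Int) (k : Nat) (hk : k ≤ 25) :
    solGoB (PySem.Int.floordiv N (2^(25-k))) k
      = (List.range (k+1)).flatMap (fun j => solPiece N (25 - j)) := by
  induction k with
  | zero =>
    simp only [solGoB]
    have : solCnt N 25 = PySem.Int.mod (PySem.Int.floordiv N (2^25)) 26 := by simp [solCnt]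
    simp [solPiece, this]
  | succ k ih =>
    have hk' : k ≤ 25 := by omega
    have h2 : PySem.Int.floordiv (PySem.Int.floordiv N (2^(25-(k+1)))) 2
        = PySem.Int.floordiv N (2^(25-k)) := by
      rw [fdiv_fdiv_two]; congr 2; omega
    simp only [solGoB, h2, ih hk']
    conv_rhs => rw [List.range_succ, List.flatMap_append, List.flatMap_cons, List.flatMap_nil,
      List.append_nil]
    congr 1
    have h3 : 25 - (k+1) = 24 - k := by omega
    have h4 : solCnt N (24 - k) = PySem.Int.mod (PySem.Int.floordiv N (2^(24-k))) 2 := by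
      simp only [solCnt]; rw [if_neg (by omega)]
    simp [solPiece, h3, h4]

lemma solution_eq (N : Int) : solution N = solution_alt N := by
  rw [solutionA_eq_pieces]
  have h0 : PySem.Int.floordiv N (2^(25-25)) = N := by
    simp [PySem.Int.floordiv]
  have := solGoB_spec N 25 (le_refl 25)
  rw [h0] at this
  rw [solution_alt, this]
  have hrev : (List.range 26).reverse = (List.range 26).map (fun j => 25 - j) := by decide
  rw [hrev, List.flatMap_map]

-- ===== VERDICT (by name: the statement is the Claim_ definition above) =====
theorem solution_spec : Claim_equal_solution := by
  intro N _
  unfold Spec_solution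
  exact solution_eq N
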